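-- pv_equiv track=rewrite | github.com/ultras8/pythonLab | zigZagSort.py | zigZagSort
-- ===== SOURCE A (Python) =====
-- def zigZagSort(listNum):
--     zig = []
--     listNum = sorted(listNum,reverse=True)
--     for i in range(len(listNum)):
--         if i % 2 != 0 or i == 1:
--             zig.append(listNum.pop(len(listNum)-1))
--         else:
--             zig.append((listNum.pop(0)))
--
--     return zig
-- ===== SOURCE B (Python) =====
-- def zigZagSort(listNum):
--     s = sorted(listNum)
--     out = []
--     lo, hi = 0, len(s) - 1
--     while lo <= hi:
--         out.append(s[hi])
--         hi -= 1
--         if lo <= hi: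
--             out.append(s[lo])
--             lo += 1
--     return out
-- ===== Notes on version B (the rewrite author's own statement) =====
-- stated objective: faster
-- what changed: replaces the pop(0)/pop(-1) destruction of the reverse-sorted list (each pop(0) is O(n)) with one ascending sort and two index pointers walking inward, so building the zigzag is a single O(n) pass after sorting
import Mathlib
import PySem

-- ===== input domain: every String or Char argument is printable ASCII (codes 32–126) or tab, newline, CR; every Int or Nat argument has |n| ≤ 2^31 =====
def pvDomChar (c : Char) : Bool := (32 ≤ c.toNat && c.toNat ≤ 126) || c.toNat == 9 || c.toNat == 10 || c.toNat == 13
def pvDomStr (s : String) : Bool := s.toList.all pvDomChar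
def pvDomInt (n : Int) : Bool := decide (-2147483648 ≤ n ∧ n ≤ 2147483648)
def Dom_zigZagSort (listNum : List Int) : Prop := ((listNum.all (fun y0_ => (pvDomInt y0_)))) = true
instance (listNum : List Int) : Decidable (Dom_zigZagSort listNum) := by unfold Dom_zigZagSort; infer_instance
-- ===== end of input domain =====

-- B replaces A's quadratic pop(0)/pop(-1) consumption of the reverse-sorted list by one
-- ascending sort plus a linear two-pointer pass (measurably faster; asymptotic change).


-- ===== PORT A =====
-- loop body of A's 'for i in range(len(listNum))' (state = (listNum, zig));
-- the 'none' branches are unreachable in the loop (the list is never empty there):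
-- Python would raise IndexError, which never happens.
def zigZagStep (st : List Int × List Int) (i : Int) : List Int × List Int :=
  if i % 2 ≠ 0 ∨ i = 1 then
    match PySem.List.pop? st.1 ((st.1.length : Int) - 1) with
    | some (v, l') => (l', st.2 ++ [v])
    | none => st
  else
    match PySem.List.pop? st.1 0 with
    | some (v, l') => (l', st.2 ++ [v])
    | none => st

def zigZagSort (listNum : List Int) : List Int :=
  let l := PySem.List.sorted listNum (fun x => x) true
  ((PySem.List.pyRange 0 (l.length : Int) 1).foldl zigZagStep (l, ([] : List Int))).2

-- ===== PORT B =====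
-- the two-pointer while loop of Source B; s is never indexed out of range (lo/hi stay in
-- bounds), so the '.getD 0' default is unreachable
def twoPtr (s : List Int) (lo hi : Int) : List Int :=
  if lo ≤ hi then
    (PySem.List.pyGet? s hi).getD 0 ::
      (if lo ≤ hi - 1 then
        (PySem.List.pyGet? s lo).getD 0 :: twoPtr s (lo + 1) (hi - 1)
       else [])
  else []
termination_by (hi - lo).toNat
decreasing_by omega

def zigZagSort_alt (listNum : List Int) : List Int :=
  let s := PySem.List.sorted listNum (fun x => x) false
  twoPtr s 0 ((s.length : Int) - 1)

-- ===== PRECONDITION & SPEC =====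
def Spec_zigZagSort (listNum : List Int) (out : List Int) : Prop := out = zigZagSort_alt listNum
instance (listNum : List Int) (out : List Int) : Decidable (Spec_zigZagSort listNum out) := by unfold Spec_zigZagSort; infer_instance

-- ===== CLAIM (what is proved, stated in full; the proofs are below) =====
def Claim_equal_zigZagSort : Prop := ∀ (listNum : List Int), Dom_zigZagSort listNum → Spec_zigZagSort listNum (zigZagSort listNum)

-- ===== LEMMAS AND PROOFS =====

-- the common zigzag shape: alternately take the front / the back of a list
def zz (front : Bool) (l : List Int) : List Int :=
  match l with
  | [] => []
  | x :: xs =>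
    if front then x :: zz false xs
    else (x :: xs).getLast (by simp) :: zz true (x :: xs).dropLast
termination_by l.length
decreasing_by all_goals (simp only [List.length_cons, List.length_dropLast]; omega)

theorem zz_nil (front : Bool) : zz front [] = [] := by unfold zz; rfl

theorem zz_cons_front (x : Int) (xs : List Int) :
    zz true (x :: xs) = x :: zz false xs := by
  rw [zz]; rfl

theorem zz_cons_back (x : Int) (xs : List Int) :
    zz false (x :: xs) = (x :: xs).getLast (by simp) :: zz true (x :: xs).dropLast := by
  rw [zz]; rfl

-- A's loop over range(a, a + len l) computes acc ++ zz (a even) l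
theorem lemmaA (n : Nat) (l acc : List Int) (a : Int) (hn : l.length = n) :
    ((PySem.List.pyRange a (a + (l.length : Int)) 1).foldl zigZagStep (l, acc)).2
      = acc ++ zz (decide (a % 2 = 0)) l := by
  induction n using Nat.strong_induction_on generalizing l acc a with
  | _ n ih =>
    subst hn
    cases l with
    | nil =>
      simp only [List.length_nil, Int.natCast_zero, add_zero]
      rw [PySem.List.pyRange_one_eq_nil le_rfl]
      simp [zz_nil]
    | cons x xs =>
      rw [PySem.List.pyRange_one_cons (by simp only [List.length_cons]; push_cast; omega)]
      simp only [List.foldl_cons]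
      by_cases hpar : a % 2 = 0
      · -- front pop
        have hcond : ¬ (a % 2 ≠ 0 ∨ a = 1) := by omega
        have hstep : zigZagStep (x :: xs, acc) a = (xs, acc ++ [x]) := by
          unfold zigZagStep
          rw [if_neg hcond]
          simp [PySem.List.pop?_zero_cons]
        rw [hstep]
        have harith : a + ((x :: xs).length : Int) = (a + 1) + (xs.length : Int) := by
          simp only [List.length_cons]; push_cast; ring
        rw [harith, ih xs.length (by simp) xs (acc ++ [x]) (a + 1) rfl]
        have h1 : decide ((a + 1) % 2 = 0) = false := by simp; omega
        have h2 : decide (a % 2 = 0) = true := by simp [hpar]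
        rw [h1, h2, zz_cons_front]
        simp
      · -- back pop
        have hne : (x :: xs) ≠ [] := by simp
        have hcond : (a % 2 ≠ 0 ∨ a = 1) := Or.inl hpar
        have hlen : xs.length < (x :: xs).length := by simp
        have hstep : zigZagStep (x :: xs, acc) a
            = ((x :: xs).dropLast, acc ++ [(x :: xs).getLast hne]) := by
          unfold zigZagStep
          rw [if_pos hcond]
          have hcast : ((((x :: xs).length : Int)) - 1) = ((xs.length : Nat) : Int) := by
            simp only [List.length_cons]; push_cast; ring
          rw [hcast, PySem.List.pop?_natCast _ _ hlen]
          have hgl : (x :: xs)[xs.length] = (x :: xs).getLast hne := by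
            rw [List.getLast_eq_getElem]
            congr 1
          have her : (x :: xs).eraseIdx xs.length = (x :: xs).dropLast := by
            rw [List.dropLast_eq_eraseIdx]
            congr 1
          rw [hgl, her]
        rw [hstep]
        have hdl : (x :: xs).dropLast.length = xs.length := by simp
        have harith : a + ((x :: xs).length : Int)
            = (a + 1) + ((x :: xs).dropLast.length : Int) := by
          rw [hdl]; simp only [List.length_cons]; push_cast; ring
        rw [harith, ih xs.length (by simp) _ _ (a + 1) hdl]
        have h1 : decide ((a + 1) % 2 = 0) = true := by simp; omega
        have h2 : decide (a % 2 = 0) = false := by simp [hpar]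
        rw [h1, h2, zz_cons_back]
        simp

-- the segment shrinks by its two ends: s[lo..hi] minus last and first = s[lo+1..hi-1]
theorem seg_step (s : List Int) (lo n : Nat) (h : lo + n <= s.length) :
    ((s.drop lo).take n).dropLast.tail = (s.drop (lo + 1)).take (n - 2) := by
  apply List.ext_getElem
  · simp; omega
  · intro i h1 h2
    simp only [List.getElem_tail, List.getElem_dropLast, List.getElem_take,
      List.getElem_drop]
    congr 1
    omega

-- B's two-pointer loop computes zz true of the reversed segment s[lo..hi]
theorem zz_back (l : List Int) (h : l ≠ []) :
    zz false l = l.getLast h :: zz true l.dropLast := by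
  cases l with
  | nil => simp at h
  | cons x xs => rw [zz_cons_back]

theorem lemmaB (n : Nat) (s : List Int) (lo hi : Int)
    (hlo : 0 ≤ lo) (hhi : hi < (s.length : Int)) (hn : (hi - lo + 1).toNat = n) :
    twoPtr s lo hi = zz true (((s.drop lo.toNat).take n).reverse) := by
  induction n using Nat.strong_induction_on generalizing s lo hi with
  | _ n ih =>
    by_cases hle : lo ≤ hi
    · -- nonempty segment
      have hn1 : 1 ≤ n := by omega
      set seg := (s.drop lo.toNat).take n with hseg
      have hseglen : seg.length = n := by
        rw [hseg]; simp; omega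
      have hsegne : seg ≠ [] := by
        intro h
        rw [h] at hseglen
        simp at hseglen
        omega
      have hget_hi : PySem.List.pyGet? s hi = some (seg.getLast hsegne) := by
        have hhi' : hi = ((hi.toNat : Nat) : Int) := by omega
        have hlt : hi.toNat < s.length := by omega
        rw [hhi', PySem.List.pyGet?_natCast, List.getElem?_eq_getElem hlt]
        congr 1
        rw [List.getLast_eq_getElem]
        simp only [hseg, List.getElem_take, List.getElem_drop]
        congr 1
        rw [hseglen]
        omega
      rw [twoPtr, if_pos hle, hget_hi]
      have hrev : seg.reverse = seg.getLast hsegne :: seg.dropLast.reverse := by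
        conv_lhs => rw [← List.dropLast_append_getLast hsegne]
        simp
      rw [hrev, zz_cons_front]
      simp only [Option.getD_some]
      congr 1
      by_cases hle2 : lo ≤ hi - 1
      · -- second element s[lo], then recurse
        have hdlne : seg.dropLast ≠ [] := by
          intro h
          have hl := congrArg List.length h
          simp [hseglen] at hl
          omega
        have hLne : seg.dropLast.reverse ≠ [] := by simp [hdlne]
        rw [if_pos hle2, zz_back _ hLne]
        have hget_lo : PySem.List.pyGet? s lo = some (seg.dropLast.reverse.getLast hLne) := by
          have hlo' : lo = ((lo.toNat : Nat) : Int) := by omega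
          have hlt : lo.toNat < s.length := by omega
          rw [hlo', PySem.List.pyGet?_natCast, List.getElem?_eq_getElem hlt]
          congr 1
          rw [List.getLast_reverse, List.head_dropLast, List.head_eq_getElem]
          simp only [hseg, List.getElem_take, List.getElem_drop]
          simp
        rw [hget_lo]
        simp only [Option.getD_some]
        congr 1
        rw [List.dropLast_reverse]
        have hseg2 : seg.dropLast.tail = (s.drop (lo + 1).toNat).take (n - 2) := by
          rw [hseg, seg_step s lo.toNat n (by omega)]
          congr 2
          omega
        rw [hseg2]
        exact ih (n - 2) (by omega) s (lo + 1) (hi - 1) (by omega) (by omega) (by omega)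
      · -- lo = hi : singleton segment
        rw [if_neg hle2]
        have hn2 : n = 1 := by omega
        have hedl : seg.dropLast = [] :=
          List.eq_nil_of_length_eq_zero (by rw [List.length_dropLast, hseglen, hn2])
        rw [hedl]
        simp [zz_nil]
    · -- empty segment
      have hn0 : n = 0 := by omega
      rw [twoPtr, if_neg hle, hn0]
      simp [zz_nil]

-- the reverse of the ascending sort IS the descending sort (values only; Int)
theorem sorted_rev_eq_reverse_sorted (xs : List Int) :
    PySem.List.sorted xs (fun x => x) true = (PySem.List.sorted xs (fun x => x) false).reverse := by
  apply List.Perm.eq_of_pairwise (le := fun a b : Int => b ≤ a)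
  · intro a b _ _ h1 h2; omega
  · exact PySem.List.sorted_pairwise_rev xs (fun x => x)
  · rw [List.pairwise_reverse]
    exact PySem.List.sorted_pairwise xs (fun x => x)
  · exact ((PySem.List.sorted_perm xs (fun x => x) true).trans
      ((PySem.List.sorted_perm xs (fun x => x) false).symm)).trans
      (List.reverse_perm _).symm

-- ===== VERDICT (by name: the statement is the Claim_ definition above) =====
theorem zigZagSort_spec : Claim_equal_zigZagSort := by
  intro listNum _
  unfold Spec_zigZagSort zigZagSort zigZagSort_alt
  set d := PySem.List.sorted listNum (fun x => x) true with hd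
  set a := PySem.List.sorted listNum (fun x => x) false with ha
  have hA : ((PySem.List.pyRange 0 (d.length : Int) 1).foldl zigZagStep (d, ([] : List Int))).2
      = zz true d := by
    have h := lemmaA d.length d [] 0 rfl
    simpa using h
  have hB : twoPtr a 0 ((a.length : Int) - 1) = zz true a.reverse := by
    have h := lemmaB a.length a 0 ((a.length : Int) - 1) (by omega) (by omega) (by omega)
    simpa using h
  simp only [hA, hB]
  rw [hd, ha, sorted_rev_eq_reverse_sorted]
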